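-- pv_equiv track=rewrite | github.com/janmartinjansen/TVIT | autopython/vbpython1.py | vb1
-- ===== SOURCE A (Python) =====
-- def vb1(inp):
--     state = 1
--     end = [2]
--     for c in inp:
--         if state == 1:
--             if c == 'a':
--                 state = 1
--             elif c == 'b':
--                 state = 2
--             else:
--                 return False
--         elif state == 2:
--             return False
--     return state in end
-- ===== SOURCE B (Python) =====
-- def vb1(inp):
--     return inp.endswith('b') and all(c == 'a' for c in inp[:-1])
-- ===== Notes on version B (the rewrite author's own statement) =====
-- stated objective: idiomatic
-- what changed: Replaces the hand-run DFA state loop with a closed-form sequence check: endswith on the final character plus an all() over the preceding prefix.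
import Mathlib
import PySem

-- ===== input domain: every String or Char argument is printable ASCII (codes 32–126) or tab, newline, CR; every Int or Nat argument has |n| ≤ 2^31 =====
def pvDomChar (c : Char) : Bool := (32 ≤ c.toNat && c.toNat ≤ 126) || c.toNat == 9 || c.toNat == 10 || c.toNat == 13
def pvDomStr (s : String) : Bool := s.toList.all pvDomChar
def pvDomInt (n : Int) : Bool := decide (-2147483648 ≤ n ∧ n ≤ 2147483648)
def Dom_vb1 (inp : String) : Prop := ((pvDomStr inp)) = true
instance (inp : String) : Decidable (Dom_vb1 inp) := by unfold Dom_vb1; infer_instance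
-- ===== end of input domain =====

-- B replaces A's hand-run DFA loop with a closed-form check (last char is 'b', rest all 'a'); objective: idiomatic.


-- ===== PORT A =====
-- the for-loop with early returns, state threaded through; [] case = `return state in end` with end = [2]
def vb1Loop (cs : List Char) (state : Int) : Bool :=
  match cs with
  | [] => state == 2
  | c :: rest =>
    if state == 1 then
      if c == 'a' then vb1Loop rest 1
      else if c == 'b' then vb1Loop rest 2
      else false
    else if state == 2 then false
    else vb1Loop rest state

def vb1 (inp : String) : Bool := vb1Loop inp.toList 1

-- ===== PORT B =====
def vb1_alt (inp : String) : Bool :=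
  PySem.Str.endswith inp "b" && (PySem.List.slice inp.toList none (some (-1))).all (fun c => c == 'a')

-- ===== PRECONDITION & SPEC =====
def Spec_vb1 (inp : String) (out : Bool) : Prop := out = vb1_alt inp
instance (inp : String) (out : Bool) : Decidable (Spec_vb1 inp out) := by unfold Spec_vb1; infer_instance

-- ===== CLAIM (what is proved, stated in full; the proofs are below) =====
def Claim_equal_vb1 : Prop := ∀ (inp : String), Dom_vb1 inp → Spec_vb1 inp (vb1 inp)

-- ===== LEMMAS AND PROOFS =====
theorem vb1Loop_one (cs : List Char) :
    vb1Loop cs 1 = ((cs.getLast? == some 'b') && cs.dropLast.all (fun c => c == 'a')) := by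
  induction cs with
  | nil => simp [vb1Loop]
  | cons c rest ih =>
    by_cases ha : c = 'a'
    · subst ha
      cases rest with
      | nil => simp [vb1Loop]
      | cons d t => simpa [vb1Loop, Bool.and_left_comm] using ih
    · by_cases hb : c = 'b'
      · subst hb
        cases rest with
        | nil => simp [vb1Loop]
        | cons d t => simp [vb1Loop]
      · cases rest with
        | nil => simp [vb1Loop, ha, hb]
        | cons d t => simp [vb1Loop, ha, hb]

theorem suffix_b_iff (cs : List Char) : ['b'] <:+ cs ↔ cs.getLast? = some 'b' := by
  rw [List.getLast?_eq_some_iff]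
  constructor
  · rintro ⟨t, rfl⟩; exact ⟨t, rfl⟩
  · rintro ⟨t, rfl⟩; exact ⟨t, rfl⟩

theorem endswith_b (s : String) :
    PySem.Str.endswith s "b" = (s.toList.getLast? == some 'b') := by
  rw [Bool.eq_iff_iff]
  have hb : "b".toList = ['b'] := rfl
  rw [show PySem.Str.endswith s "b" = PySem.Chars.endswith s.toList "b".toList from rfl,
      PySem.Chars.endswith_iff, hb, suffix_b_iff, beq_iff_eq]

-- ===== VERDICT (by name: the statement is the Claim_ definition above) =====
theorem vb1_spec : Claim_equal_vb1 := by
  intro inp _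
  unfold Spec_vb1 vb1 vb1_alt
  rw [vb1Loop_one, endswith_b, PySem.List.slice_to_neg_one]
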